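-- pv_equiv track=rewrite | github.com/Shenzoni/multigw | Gmail/dottrick.py | gen_dot_variants
-- ===== SOURCE A (Python) =====
-- def gen_dot_variants(local):
--     """
--     Generate dot-variations for the local part.
--     Includes original (mask=0). Caps unique combinations at 512.
--     """
--     n = len(local)
--     if n <= 1:
--         yield local
--         return
--
--     total = 1 << (n - 1)  # 2^(n-1) combinations between characters
--     cap = 512
--     limit = min(total, cap)
--
--     for mask in range(limit):
--         parts = []
--         for i, ch in enumerate(local):
--             parts.append(ch)
--             if i < n - 1 and ((mask >> i) & 1):
--                 parts.append('.')
--         yield ''.join(parts)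
-- ===== SOURCE B (Python) =====
-- def gen_dot_variants(local):
--     """
--     Generate dot-variations for the local part.
--     Includes original (mask=0). Caps unique combinations at 512.
--     """
--     n = len(local)
--     if n <= 1:
--         yield local
--         return
--     k = min(n - 1, 9)  # cap 512 = 2^9: only the first 9 gaps ever carry a dot
--     def rec(s):
--         # all dot-variants of s with a dot optionally after each char,
--         # the first gap varying fastest
--         if not s:
--             return ['']
--         out = []
--         for rest in rec(s[1:]):
--             out.append(s[0] + rest)
--             out.append(s[0] + '.' + rest)
--         return out
--     suffix = local[k:]
--     for w in rec(local[:k]):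
--         yield w + suffix
-- ===== Notes on version B (the rewrite author's own statement) =====
-- stated objective: faster
-- what changed: Instead of looping over 512 bitmasks and rebuilding every output string character-by-character, B recursively enumerates the dot-variants of only the first min(n-1,9) gaps (the only gaps the 512-cap ever lets vary) and appends the fixed undotted suffix to each.
import Mathlib
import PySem

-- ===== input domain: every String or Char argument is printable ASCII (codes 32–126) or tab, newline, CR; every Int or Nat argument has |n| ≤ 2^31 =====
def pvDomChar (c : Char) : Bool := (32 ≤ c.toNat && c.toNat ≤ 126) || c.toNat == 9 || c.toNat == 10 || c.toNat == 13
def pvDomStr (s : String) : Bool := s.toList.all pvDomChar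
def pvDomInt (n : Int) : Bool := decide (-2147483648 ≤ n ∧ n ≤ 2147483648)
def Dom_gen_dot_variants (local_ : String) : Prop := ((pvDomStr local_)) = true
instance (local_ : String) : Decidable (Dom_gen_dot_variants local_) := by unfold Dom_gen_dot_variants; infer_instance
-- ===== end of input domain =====

-- B replaces A's per-mask character-by-character rebuild by a recursive enumeration of the
-- dot-variants of only the first min(n-1,9) gaps (the only gaps the 512-cap lets vary),
-- each followed by the fixed undotted suffix (objective: faster, measured).


-- ===== PORT A =====
-- Port of A (generator → list of yielded strings). '1 << (n-1)' is ported as 2^(n-1).toNat;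
-- 'mask >> i' as floor-division by 2^i and '& 1' as floor-mod 2 (exact here: range() yields
-- nonnegative masks); ''.join(parts)' is PySem.Str.join "" parts.
def gen_dot_variants (local_ : String) : List String :=
  let n : Int := PySem.Str.len local_
  if n ≤ 1 then [local_]
  else
    let total : Int := 2 ^ (n - 1).toNat
    let cap : Int := 512
    let limit : Int := min total cap
    (PySem.List.pyRange 0 limit 1).map (fun mask =>
      let parts : List String := (PySem.List.enumerate local_.toList 0).foldl
        (fun parts p =>
          let parts := parts ++ [String.ofList [p.2]]
          if p.1 < n - 1 ∧ PySem.Int.mod (PySem.Int.floordiv mask (2 ^ p.1.toNat)) 2 = 1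
          then parts ++ ["."] else parts) []
      PySem.Str.join "" parts)

-- ===== PORT B =====
-- Port of B's inner `rec(s)` (strings carried as List Char; s[0]+rest / s[0]+'.'+rest
-- are the two cons-forms).
def gdvRec : List Char → List (List Char)
  | [] => [[]]
  | c :: rest => (gdvRec rest).flatMap (fun r => [c :: r, c :: '.' :: r])

def gen_dot_variants_alt (local_ : String) : List String :=
  let n := local_.toList.length
  if n ≤ 1 then [local_]
  else
    let k := min (n - 1) 9
    let suffix := local_.toList.drop k
    (gdvRec (local_.toList.take k)).map (fun w => String.ofList (w ++ suffix))

-- ===== PRECONDITION & SPEC =====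
def Spec_gen_dot_variants (local_ : String) (out : List String) : Prop := out = gen_dot_variants_alt local_
instance (local_ : String) (out : List String) : Decidable (Spec_gen_dot_variants local_ out) := by unfold Spec_gen_dot_variants; infer_instance

-- ===== CLAIM (what is proved, stated in full; the proofs are below) =====
def Claim_equal_gen_dot_variants : Prop := ∀ (local_ : String), Dom_gen_dot_variants local_ → Spec_gen_dot_variants local_ (gen_dot_variants local_)

-- ===== LEMMAS AND PROOFS =====

-- the string A builds for mask m: a dot after gap i iff bit i of m is set
def pvIns : List Char → Nat → List Char
  | [], _ => []
  | [c], _ => [c]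
  | c :: d :: rest, m =>
      c :: (if m % 2 = 1 then '.' :: pvIns (d :: rest) (m / 2) else pvIns (d :: rest) (m / 2))

lemma pv_range_two_mul {α : Type} (N : ℕ) (f : ℕ → α) :
    (List.range (2 * N)).map f = (List.range N).flatMap (fun j => [f (2 * j), f (2 * j + 1)]) := by
  induction N with
  | zero => simp
  | succ k ih =>
      have h : 2 * (k + 1) = (2 * k + 1) + 1 := by ring
      rw [h, List.range_succ, List.range_succ, List.range_succ]
      simp [ih]

-- prefix variants: a dot optionally after every char (including the last)
def pvIMark : List Char → Nat → List Char
  | [], _ => []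
  | c :: rest, m =>
      c :: (if m % 2 = 1 then '.' :: pvIMark rest (m / 2) else pvIMark rest (m / 2))

lemma pvGRec_eq : ∀ (p : List Char), gdvRec p = (List.range (2 ^ p.length)).map (pvIMark p) := by
  intro p
  induction p with
  | nil => simp [gdvRec, pvIMark]
  | cons c rest ih =>
      rw [show gdvRec (c :: rest) = (gdvRec rest).flatMap (fun r => [c :: r, c :: '.' :: r]) from rfl,
          ih, show (c :: rest).length = rest.length + 1 from rfl, pow_succ, mul_comm,
          pv_range_two_mul, List.flatMap_map]
      refine List.flatMap_congr (fun j _ => ?_)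
      have h0 : (2 * j) % 2 = 0 := by omega
      have h1 : (2 * j + 1) % 2 = 1 := by omega
      have h2 : (2 * j) / 2 = j := by omega
      have h3 : (2 * j + 1) / 2 = j := by omega
      simp [pvIMark, h0, h1, h2, h3]

lemma pvIns_zero : ∀ (s : List Char), pvIns s 0 = s := by
  intro s
  induction s with
  | nil => rfl
  | cons c t ih => cases t <;> simp_all [pvIns]

lemma pv_mark_ins : ∀ (k : ℕ) (s : List Char) (m : ℕ), k + 1 ≤ s.length → m < 2 ^ k →
    pvIMark (s.take k) m ++ s.drop k = pvIns s m := by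
  intro k
  induction k with
  | zero =>
      intro s m _ hm
      have : m = 0 := by omega
      subst this
      simp [pvIMark, pvIns_zero]
  | succ k ih =>
      intro s m hlen hm
      match s with
      | c :: d :: rest =>
          rw [List.take_succ_cons, List.drop_succ_cons,
              show pvIMark (c :: (d :: rest).take k) m
                = c :: (if m % 2 = 1 then '.' :: pvIMark ((d :: rest).take k) (m / 2)
                        else pvIMark ((d :: rest).take k) (m / 2)) from rfl,
              show pvIns (c :: d :: rest) m
                = c :: (if m % 2 = 1 then '.' :: pvIns (d :: rest) (m / 2)
                        else pvIns (d :: rest) (m / 2)) from rfl]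
          have hrec := ih (d :: rest) (m / 2) (by simp at hlen ⊢; omega)
            (by have h2 : 2 ^ (k + 1) = 2 * 2 ^ k := by ring
                omega)
          by_cases h : m % 2 = 1 <;> simp [h, ← hrec]
      | [c] => simp at hlen
      | [] => simp at hlen

lemma pv_enum_shift {α : Type} : ∀ (xs : List α) (k : Int),
    PySem.List.enumerate xs (k + 1) = (PySem.List.enumerate xs k).map (fun p => (p.1 + 1, p.2)) := by
  intro xs
  induction xs with
  | nil => intro k; simp [PySem.List.enumerate]
  | cons x t ih => intro k; simp [PySem.List.enumerate_cons, ih]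

lemma pv_floordiv_pow (a : Int) (b : ℕ) (h : 0 ≤ a) :
    PySem.Int.floordiv a (2 ^ b) = ((a.toNat / 2 ^ b : ℕ) : Int) := by
  rw [PySem.Int.floordiv, Int.fdiv_eq_ediv, Int.natCast_ediv]
  simp [Int.toNat_of_nonneg h]

lemma pv_mod_two (a : Int) (h : 0 ≤ a) :
    PySem.Int.mod a 2 = ((a.toNat % 2 : ℕ) : Int) := by
  rw [PySem.Int.mod, Int.fmod_eq_emod, Int.natCast_emod]
  simp [Int.toNat_of_nonneg h]

-- the char-level piece contributed by one (index, char) pair of A's inner loop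
def pvGA (n : Int) (M : ℕ) (p : Int × Char) : List Char :=
  if p.1 < n - 1 ∧ PySem.Int.mod (PySem.Int.floordiv (M : Int) (2 ^ p.1.toNat)) 2 = 1
  then [p.2, '.'] else [p.2]

lemma pv_bit_cond (M k : ℕ) :
    (PySem.Int.mod (PySem.Int.floordiv (M : Int) (2 ^ k)) 2 = 1) ↔ (M / 2 ^ k % 2 = 1) := by
  have h : ((M : Int)).toNat = M := by omega
  rw [pv_floordiv_pow _ _ (by positivity), h, pv_mod_two _ (by positivity)]
  simp only [Int.toNat_natCast]
  omega

lemma pv_flatMap_enum : ∀ (s : List Char) (M : ℕ),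
    (PySem.List.enumerate s 0).flatMap (pvGA (s.length : Int) M) = pvIns s M := by
  intro s
  induction s with
  | nil => intro M; simp [PySem.List.enumerate, pvIns]
  | cons c t ih =>
      intro M
      cases t with
      | nil =>
          simp [PySem.List.enumerate, pvGA, pvIns]
      | cons d rest =>
          rw [PySem.List.enumerate_cons, List.flatMap_cons,
              show (0 : Int) + 1 = 0 + 1 from rfl, pv_enum_shift, List.flatMap_map]
          have htail : ((PySem.List.enumerate (d :: rest) 0).flatMap
              (fun p => pvGA ((c :: d :: rest).length : Int) M (p.1 + 1, p.2)))
              = (PySem.List.enumerate (d :: rest) 0).flatMap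
                  (pvGA ((d :: rest).length : Int) (M / 2)) := by
            refine List.flatMap_congr (fun p hp => ?_)
            obtain ⟨k, hk, rfl⟩ := (PySem.List.mem_enumerate_iff _ _ _).mp hp
            have hcond : ((0 : Int) + k + 1 < ((c :: d :: rest).length : Int) - 1)
                ↔ ((0 : Int) + k < ((d :: rest).length : Int) - 1) := by
              simp only [List.length_cons]
              push_cast
              omega
            have htn : ((0 : Int) + k + 1).toNat = k + 1 := by omega
            have htn0 : ((0 : Int) + k).toNat = k := by omega
            have hbit : (PySem.Int.mod (PySem.Int.floordiv (M : Int) (2 ^ (k + 1))) 2 = 1)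
                ↔ (PySem.Int.mod (PySem.Int.floordiv ((M / 2 : ℕ) : Int) (2 ^ k)) 2 = 1) := by
              rw [pv_bit_cond, pv_bit_cond, Nat.div_div_eq_div_mul, pow_succ, mul_comm]
            simp only [pvGA, htn, htn0, hcond, hbit]
          rw [htail, ih]
          have hhead : pvGA ((c :: d :: rest).length : Int) M (0, c)
              = if M % 2 = 1 then [c, '.'] else [c] := by
            have h1 : ((0 : Int) < ((c :: d :: rest).length : Int) - 1) := by
              simp only [List.length_cons]
              push_cast
              omega
            have h2 : (PySem.Int.mod (PySem.Int.floordiv (M : Int) (2 ^ (0 : Int).toNat)) 2 = 1)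
                ↔ (M % 2 = 1) := by
              rw [show ((0:Int).toNat) = 0 from rfl, pv_bit_cond]
              simp
            simp only [pvGA, h2]
            split_ifs with h <;> simp_all
          rw [hhead]
          by_cases h : M % 2 = 1 <;> simp [pvIns, h]

lemma pv_join_nil (ps : List (List Char)) : PySem.Chars.join [] ps = ps.flatten := by
  simp only [PySem.Chars.join, List.intercalate]
  induction ps with
  | nil => rfl
  | cons a t ih => cases t <;> simp_all [List.intersperse]

lemma pv_string_ext (a b : String) (h : a.toList = b.toList) : a = b := by
  rw [← String.ofList_toList (s := a), ← String.ofList_toList (s := b), h]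

-- flatten distributes over flatMap
lemma pv_flatten_flatMap {α β : Type} (l : List α) (h : α → List (List β)) :
    (l.flatMap h).flatten = l.flatMap (fun x => (h x).flatten) := by
  induction l <;> simp_all

-- A's per-mask string equals pvIns at mask.toNat
lemma pv_mask_string (local_ : String) (mask : Int) (hm : 0 ≤ mask) :
    PySem.Str.join "" ((PySem.List.enumerate local_.toList 0).foldl
      (fun parts p =>
        if p.1 < ((local_.toList.length : Int)) - 1 ∧
            PySem.Int.mod (PySem.Int.floordiv mask (2 ^ p.1.toNat)) 2 = 1
        then parts ++ [String.ofList [p.2]] ++ ["."]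
        else parts ++ [String.ofList [p.2]]) [])
    = String.ofList (pvIns local_.toList mask.toNat) := by
  have hfun : (fun (parts : List String) (p : Int × Char) =>
      if p.1 < ((local_.toList.length : Int)) - 1 ∧
          PySem.Int.mod (PySem.Int.floordiv mask (2 ^ p.1.toNat)) 2 = 1
      then parts ++ [String.ofList [p.2]] ++ ["."]
      else parts ++ [String.ofList [p.2]])
      = (fun parts p => parts ++
          (if p.1 < ((local_.toList.length : Int)) - 1 ∧
              PySem.Int.mod (PySem.Int.floordiv mask (2 ^ p.1.toNat)) 2 = 1
           then [String.ofList [p.2], "."] else [String.ofList [p.2]])) := by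
    funext parts p
    split_ifs <;> simp
  rw [hfun, PySem.List.foldl_append_eq_flatMap]
  refine pv_string_ext _ _ ?_
  rw [PySem.Str.toList_join, show ("" : String).toList = ([] : List Char) from rfl, pv_join_nil,
      String.toList_ofList, List.nil_append, List.map_flatMap, pv_flatten_flatMap,
      ← pv_flatMap_enum local_.toList mask.toNat]
  have hmask : ((mask.toNat : ℕ) : Int) = mask := by omega
  refine List.flatMap_congr (fun p hp => ?_)
  simp only [pvGA, hmask]
  split_ifs <;> simp

-- ===== VERDICT (by name: the statement is the Claim_ definition above) =====
theorem gen_dot_variants_spec : Claim_equal_gen_dot_variants := by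
  intro local_ _
  unfold Spec_gen_dot_variants gen_dot_variants gen_dot_variants_alt
  simp only [PySem.Str.len_eq]
  by_cases hsmall : (local_.toList.length : Int) ≤ 1
  · rw [if_pos hsmall, if_pos (show local_.toList.length ≤ 1 from by omega)]
  · have hlen : 2 ≤ local_.toList.length := by omega
    rw [if_neg hsmall, if_neg (by omega : ¬ local_.toList.length ≤ 1)]
    -- B's side: prefix enumeration + fixed suffix
    rw [pvGRec_eq]
    have hk9 : min (local_.toList.length - 1) 9 ≤ local_.toList.length := by omega
    have hkt : (local_.toList.take (min (local_.toList.length - 1) 9)).length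
        = min (local_.toList.length - 1) 9 := by
      rw [List.length_take]
      omega
    rw [hkt]
    -- A's side: the masks are exactly range (2 ^ min (n-1) 9)
    have hlim : ((min ((2:Int) ^ ((local_.toList.length : Int) - 1).toNat) 512).toNat)
        = 2 ^ (min (local_.toList.length - 1) 9) := by
      have he : ((local_.toList.length : Int) - 1).toNat = local_.toList.length - 1 := by omega
      rw [he]
      have hcast : ∀ (e : ℕ), ((2:Int) ^ e) = ((2 ^ e : ℕ) : Int) := by
        intro e; push_cast; ring
      by_cases h : local_.toList.length - 1 ≤ 9
      · rw [min_eq_left h,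
            min_eq_left (by rw [hcast]; exact_mod_cast Nat.pow_le_pow_right (by omega) h),
            hcast, Int.toNat_natCast]
      · have h9 : (9 : ℕ) ≤ local_.toList.length - 1 := by omega
        rw [min_eq_right h9,
            min_eq_right (le_trans (by norm_num : (512:Int) ≤ 2 ^ 9)
              (by rw [hcast, hcast]; exact_mod_cast Nat.pow_le_pow_right (by omega) h9))]
        rfl
    rw [PySem.List.pyRange_one,
        show ((min ((2:Int) ^ ((local_.toList.length : Int) - 1).toNat) 512) - 0)
          = (min ((2:Int) ^ ((local_.toList.length : Int) - 1).toNat) 512) from by ring,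
        hlim]
    simp only [List.map_map]
    refine List.map_congr_left (fun m hm => ?_)
    simp only [Function.comp]
    have hms := pv_mask_string local_ (0 + (m : Int)) (by omega)
    rw [show ((0 : Int) + (m : ℕ)).toNat = m from by omega] at hms
    rw [pv_mark_ins (min (local_.toList.length - 1) 9) local_.toList m
        (by omega) (by simpa using List.mem_range.mp hm)]
    exact hms
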